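-- pv_equiv track=rewrite | github.com/OmkArsoni72/pupil | services/ai/floor_wise_prerequisite_discovery.py | _get_grade_levels
-- ===== SOURCE A (Python) =====
-- from typing import Dict, Any, List, Optional
--
-- def _get_grade_levels(current_grade: str, max_levels: int) -> List[str]:
--     """
--     Get list of grade levels going backwards from current grade.
--     """
--     grade_mapping = {
--         "grade_12": 12, "grade_11": 11, "grade_10": 10, "grade_9": 9,
--         "grade_8": 8, "grade_7": 7, "grade_6": 6, "grade_5": 5,
--         "grade_4": 4, "grade_3": 3, "grade_2": 2, "grade_1": 1
--     }
--
--     current_level = grade_mapping.get(current_grade, 10)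
--     grade_levels = []
--
--     for i in range(max_levels):
--         level = current_level - i - 1
--         if level >= 1:
--             grade_levels.append(f"grade_{level}")
--
--     return grade_levels
-- ===== SOURCE B (Python) =====
-- from typing import List
--
-- # Static descending table of all grade labels; the answer is a slice of it.
-- _ALL_GRADES = [
--     "grade_12", "grade_11", "grade_10", "grade_9",
--     "grade_8", "grade_7", "grade_6", "grade_5",
--     "grade_4", "grade_3", "grade_2", "grade_1",
-- ]
--
-- def _get_grade_levels(current_grade: str, max_levels: int) -> List[str]:
--     """
--     Get list of grade levels going backwards from current grade.
--     """
--     try: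
--         idx = _ALL_GRADES.index(current_grade)
--     except ValueError:
--         idx = 2  # unknown grades are treated as grade_10
--     return _ALL_GRADES[idx + 1 : idx + 1 + max(max_levels, 0)]
-- ===== Notes on version B (the rewrite author's own statement) =====
-- stated objective: alternative
-- what changed: Replaces the arithmetic generate-and-filter loop (map current_grade to a number, count i up to max_levels, format f"grade_{level}" for each level >= 1) with a precomputed static table of all grade labels: look up current_grade's position in the table and return the following slice, so no per-call string formatting, counting or filtering happens at all.
import Mathlib
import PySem

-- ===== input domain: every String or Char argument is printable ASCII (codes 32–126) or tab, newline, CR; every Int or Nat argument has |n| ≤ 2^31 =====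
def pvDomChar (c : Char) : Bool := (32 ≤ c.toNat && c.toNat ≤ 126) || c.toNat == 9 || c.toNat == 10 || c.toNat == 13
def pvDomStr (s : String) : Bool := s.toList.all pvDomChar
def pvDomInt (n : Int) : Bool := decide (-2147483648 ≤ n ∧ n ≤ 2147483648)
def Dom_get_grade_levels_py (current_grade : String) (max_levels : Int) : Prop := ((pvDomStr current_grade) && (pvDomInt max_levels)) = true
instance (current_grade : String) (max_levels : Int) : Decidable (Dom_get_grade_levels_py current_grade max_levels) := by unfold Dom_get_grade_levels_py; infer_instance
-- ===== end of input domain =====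

-- B replaces A's generate-and-filter counting loop by a precomputed static table of all
-- grade labels, looked up by position and sliced (alternative algorithm, similar cost).


-- ===== PORT A =====
def pvGradeMapping : PySem.Dict String Int := PySem.Dict.ofList
  [("grade_12", 12), ("grade_11", 11), ("grade_10", 10), ("grade_9", 9),
   ("grade_8", 8), ("grade_7", 7), ("grade_6", 6), ("grade_5", 5),
   ("grade_4", 4), ("grade_3", 3), ("grade_2", 2), ("grade_1", 1)]

def get_grade_levels_py (current_grade : String) (max_levels : Int) : List String :=
  let current_level := pvGradeMapping.getD current_grade 10
  (PySem.List.pyRange 0 max_levels 1).foldl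
    (fun grade_levels i =>
      let level := current_level - i - 1
      if 1 ≤ level then grade_levels ++ ["grade_" ++ PySem.Int.toStr level] else grade_levels)
    []

-- ===== PORT B =====
def pvAllGrades : List String :=
  ["grade_12", "grade_11", "grade_10", "grade_9",
   "grade_8", "grade_7", "grade_6", "grade_5",
   "grade_4", "grade_3", "grade_2", "grade_1"]

-- try/except ValueError around .index → Option match (the except branch gives idx = 2)
def get_grade_levels_py_alt (current_grade : String) (max_levels : Int) : List String :=
  let idx : Int := match PySem.List.index? pvAllGrades current_grade with
    | some k => (k : Int)
    | none => 2
  PySem.List.slice pvAllGrades (some (idx + 1)) (some (idx + 1 + max max_levels 0))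

-- ===== PRECONDITION & SPEC =====
def Spec_get_grade_levels_py (current_grade : String) (max_levels : Int) (out : List String) : Prop := out = get_grade_levels_py_alt current_grade max_levels
instance (current_grade : String) (max_levels : Int) (out : List String) : Decidable (Spec_get_grade_levels_py current_grade max_levels out) := by unfold Spec_get_grade_levels_py; infer_instance

-- ===== CLAIM (what is proved, stated in full; the proofs are below) =====
def Claim_equal_get_grade_levels_py : Prop := ∀ (current_grade : String) (max_levels : Int), Dom_get_grade_levels_py current_grade max_levels → Spec_get_grade_levels_py current_grade max_levels (get_grade_levels_py current_grade max_levels)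

-- ===== LEMMAS AND PROOFS =====

-- ascending Nat range truncated by a `<` filter
lemma pv_filter_range_lt (n m : Nat) :
    (List.range n).filter (fun k => decide (k < m)) = List.range (min n m) := by
  induction n with
  | zero => simp
  | succ n ih =>
    rw [List.range_succ, List.filter_append, ih]
    by_cases h : n < m
    · have h1 : min n m = n := by omega
      have h2 : min (n + 1) m = n + 1 := by omega
      simp [h, h1, List.range_succ]
    · have h1 : min n m = m := by omega
      have h2 : min (n + 1) m = m := by omega
      simp [h, h1, h2]

-- A's loop produces min(L-1, max_levels) descending labels starting at level L-1
lemma pv_a_core (L m : Int) :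
    (PySem.List.pyRange 0 m 1).foldl
      (fun acc i => if 1 ≤ L - i - 1 then acc ++ ["grade_" ++ PySem.Int.toStr (L - i - 1)] else acc) []
    = (List.range (min (L - 1).toNat m.toNat)).map
        (fun (k : Nat) => "grade_" ++ PySem.Int.toStr (L - 1 - (k : Int))) := by
  rw [PySem.List.foldl_append_ite, PySem.List.pyRange_one, List.filter_map, List.map_map]
  simp only [Function.comp_def, List.nil_append]
  have hfilt : List.filter (fun k : Nat => decide (1 ≤ L - (0 + (k : Int)) - 1)) (List.range (m - 0).toNat)
      = List.filter (fun k : Nat => decide (k < (L - 1).toNat)) (List.range (m - 0).toNat) :=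
    List.filter_congr (by intro k _; simp only [decide_eq_decide]; omega)
  rw [hfilt, pv_filter_range_lt]
  have hn : min (m - 0).toNat (L - 1).toNat = min (L - 1).toNat m.toNat := by omega
  rw [hn]
  apply List.map_congr_left
  intro k _
  have h : L - ((0 : Int) + k) - 1 = L - 1 - (k : Int) := by ring
  rw [h]

-- the table entry at position j names grade 12 - j
lemma pv_table_entry (j : Nat) (hj : j < 12) :
    pvAllGrades.getD j "" = "grade_" ++ PySem.Int.toStr (12 - (j : Int)) := by
  interval_cases j <;> decide

-- a list that is positionwise a function of the index equals a range map
lemma pv_take_eq_range_map {α : Type} (ys : List α) (g : Nat → α)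
    (h : ∀ k (hk : k < ys.length), ys[k] = g k) (n : Nat) :
    ys.take n = (List.range (min ys.length n)).map g := by
  apply List.ext_getElem
  · simp [Nat.min_comm]
  · intro k h1 h2
    simp only [List.getElem_take, List.getElem_map, List.getElem_range]
    exact h k (by simp at h1; omega)

-- B's lookup agrees with A's dict lookup: idx = 12 - level, level ∈ [1, 12]
lemma pv_lookup (g : String) :
    (match PySem.List.index? pvAllGrades g with
      | some k => (k : Int)
      | none => 2) = 12 - pvGradeMapping.getD g 10
    ∧ 1 ≤ pvGradeMapping.getD g 10 ∧ pvGradeMapping.getD g 10 ≤ 12 := by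
  by_cases hmem : g ∈ pvAllGrades
  · fin_cases hmem <;> exact ⟨by decide, by decide, by decide⟩
  · have hidx : PySem.List.index? pvAllGrades g = none := by
      simp [PySem.List.index?_eq_idxOf?, List.idxOf?_eq_none_iff, hmem]
    simp only [pvAllGrades, List.mem_cons, List.not_mem_nil, or_false, not_or] at hmem
    obtain ⟨h1, h2, h3, h4, h5, h6, h7, h8, h9, h10, h11, h12⟩ := hmem
    have hmk : pvGradeMapping = PySem.Dict.mk
      [("grade_12", 12), ("grade_11", 11), ("grade_10", 10), ("grade_9", 9),
       ("grade_8", 8), ("grade_7", 7), ("grade_6", 6), ("grade_5", 5),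
       ("grade_4", 4), ("grade_3", 3), ("grade_2", 2), ("grade_1", 1)] := by decide
    have hget : pvGradeMapping.getD g 10 = 10 := by
      rw [hmk, PySem.Dict.getD_eq_get?_getD]
      simp [Ne.symm h1, Ne.symm h2, Ne.symm h3, Ne.symm h4,
        Ne.symm h5, Ne.symm h6, Ne.symm h7, Ne.symm h8, Ne.symm h9, Ne.symm h10,
        Ne.symm h11, Ne.symm h12, PySem.Dict.get?]
    rw [hidx, hget]
    exact ⟨rfl, by norm_num, by norm_num⟩

theorem pv_main (current_grade : String) (max_levels : Int) :
    get_grade_levels_py current_grade max_levels = get_grade_levels_py_alt current_grade max_levels := by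
  obtain ⟨hidx, hL1, hL2⟩ := pv_lookup current_grade
  unfold get_grade_levels_py get_grade_levels_py_alt
  rw [hidx, pv_a_core]
  set L := pvGradeMapping.getD current_grade 10 with hLdef
  have hM0 : (0 : Int) ≤ max max_levels 0 := le_max_right _ _
  have hMt : (max max_levels 0).toNat = max_levels.toNat := by
    rcases le_total max_levels 0 with h | h
    · rw [max_eq_right h]; omega
    · rw [max_eq_left h]
  have hstart : (0 : Int) ≤ 12 - L + 1 := by omega
  have hstop : (0 : Int) ≤ 12 - L + 1 + max max_levels 0 := by omega
  rw [PySem.List.slice_toNat _ hstart hstop]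
  have hdropL : (pvAllGrades.drop (12 - L + 1).toNat).length = (L - 1).toNat := by
    simp [pvAllGrades]; omega
  have htake : (12 - L + 1 + max max_levels 0).toNat - (12 - L + 1).toNat = max_levels.toNat := by
    generalize hg : max max_levels 0 = M at hM0 hMt
    omega
  rw [htake,
    pv_take_eq_range_map (pvAllGrades.drop (12 - L + 1).toNat)
      (fun (k : Nat) => "grade_" ++ PySem.Int.toStr (L - 1 - (k : Int)))
      (by
        intro k hk
        rw [hdropL] at hk
        have hj : (12 - L + 1).toNat + k < 12 := by omega
        rw [List.getElem_drop, ← List.getD_eq_getElem pvAllGrades "", pv_table_entry _ hj]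
        congr 2
        push_cast
        omega),
    hdropL]

-- ===== VERDICT (by name: the statement is the Claim_ definition above) =====
theorem get_grade_levels_py_spec : Claim_equal_get_grade_levels_py := by
  intro g m _
  unfold Spec_get_grade_levels_py
  exact pv_main g m
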